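-- pv_equiv track=rewrite | github.com/emdb-empiar/sfftk | sfftk/core/parser.py | check_multi_file_formats
-- ===== SOURCE A (Python) =====
-- MULTI_FILE_FORMATS = ['stl', 'map', 'mrc', 'rec']
--
-- def _get_file_extension(fn):
--     """Extract the file extension
--
--     :param str fn: filename
--     :return str ext: extension
--     """
--     return fn.split('.')[-1]
--
-- def check_multi_file_formats(file_names):
--     """Check file names for file formats
--
--     When working with multifile segmentations, this function checks that all files are consistent
--
--     :param list file_names: a list of file names
--     :return: a tuple consisting of whether or not the set of file formats if valid, the set of file formats observed
--         and the set of invalid file formats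
--     :rtype: tuple[bool, set, set]
--     """
--     is_valid_format = True
--     file_formats = set()
--     invalid_formats = set()
--     for fn in file_names:
--         # ff = fn.split('.')[-1].lower()
--         ff = _get_file_extension(fn)
--         if ff in MULTI_FILE_FORMATS:
--             file_formats.add(ff)
--         else:
--             invalid_formats.add(ff)
--             is_valid_format = False
--     if len(file_formats) == 1:
--         file_format = file_formats.pop()
--     else:
--         file_format = None
--         invalid_formats.union(file_formats)
--     return is_valid_format, file_format, invalid_formats
-- ===== SOURCE B (Python) =====
-- MULTI_FILE_FORMATS = ['stl', 'map', 'mrc', 'rec']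
--
--
-- def _get_file_extension(fn):
--     return fn.split('.')[-1]
--
--
-- def check_multi_file_formats(file_names):
--     # Stage 1: collect the distinct extensions observed.
--     remaining = set()
--     for fn in file_names:
--         remaining.add(_get_file_extension(fn))
--     # Stage 2: peel each known multi-file format off that set; whatever is
--     # left over is exactly the set of invalid formats.
--     found = []
--     for f in MULTI_FILE_FORMATS:
--         if f in remaining:
--             remaining.discard(f)
--             found.append(f)
--     file_format = found[0] if len(found) == 1 else None
--     return not remaining, file_format, remaining
-- ===== Notes on version B (the rewrite author's own statement) =====
-- stated objective: alternative
-- what changed: Instead of one pass branching each file's extension into valid/invalid sets with a mutated validity flag, B first collects the distinct observed extensions, then iterates over the fixed MULTI_FILE_FORMATS list peeling known formats off that set; the leftover set is the invalid set, validity is its emptiness, and the peeled list supplies the single format.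
import Mathlib
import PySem

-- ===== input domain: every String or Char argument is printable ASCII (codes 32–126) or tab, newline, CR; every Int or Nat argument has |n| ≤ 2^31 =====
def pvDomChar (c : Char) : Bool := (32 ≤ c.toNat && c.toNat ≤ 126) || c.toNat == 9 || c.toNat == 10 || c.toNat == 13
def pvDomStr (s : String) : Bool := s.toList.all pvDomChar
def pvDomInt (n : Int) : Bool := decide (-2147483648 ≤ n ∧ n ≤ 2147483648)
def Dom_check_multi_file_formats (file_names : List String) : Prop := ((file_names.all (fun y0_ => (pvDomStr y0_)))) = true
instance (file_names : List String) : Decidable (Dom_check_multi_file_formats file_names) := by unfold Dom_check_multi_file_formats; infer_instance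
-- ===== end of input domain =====

-- B replaces A's single-pass partition (per-element branching, mutated validity flag) by two
-- stages: collect the distinct extensions, then peel the known formats off that set; the
-- leftover set is the invalid set. Alternative decomposition; same results.


-- ===== PORT A =====
def MULTI_FILE_FORMATS : List String := ["stl", "map", "mrc", "rec"]

-- fn.split('.')[-1]  ('.' is never empty, so split? is some; split never yields [])
def _get_file_extension (fn : String) : String :=
  PySem.List.pyGetD ((PySem.Str.split? fn ".").getD []) (-1) ""

-- the body of A's for-loop over (is_valid_format, file_formats, invalid_formats)
def stepA (st : Bool × PySem.Set String × PySem.Set String) (fn : String) :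
    Bool × PySem.Set String × PySem.Set String :=
  let ff := _get_file_extension fn
  if MULTI_FILE_FORMATS.contains ff then
    (st.1, PySem.Set.add st.2.1 ff, st.2.2)
  else
    (false, st.2.1, PySem.Set.add st.2.2 ff)

def check_multi_file_formats (file_names : List String) : Bool × Option String × List String :=
  let st := file_names.foldl stepA (true, PySem.Set.empty, PySem.Set.empty)
  if PySem.Set.len st.2.1 = 1 then
    -- file_formats.pop() on a one-element set yields its sole element
    (st.1, st.2.1[0]?, st.2.2)
  else
    (st.1, none, st.2.2)

-- ===== PORT B =====
-- the body of B's second loop: peel format f off (remaining, found)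
def stepB (st : PySem.Set String × List String) (f : String) :
    PySem.Set String × List String :=
  if PySem.Set.contains st.1 f then (PySem.Set.discard st.1 f, st.2 ++ [f]) else st

def check_multi_file_formats_alt (file_names : List String) : Bool × Option String × List String :=
  -- Stage 1: remaining = set(); for fn in file_names: remaining.add(_get_file_extension(fn))
  let remaining := file_names.foldl
    (fun (s : PySem.Set String) fn => PySem.Set.add s (_get_file_extension fn)) PySem.Set.empty
  -- Stage 2: found = []; for f in MULTI_FILE_FORMATS: if f in remaining: discard & append
  let st := MULTI_FILE_FORMATS.foldl stepB (remaining, [])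
  (st.1.isEmpty, if st.2.length = 1 then st.2[0]? else none, st.1)

-- ===== PRECONDITION & SPEC =====
def Spec_check_multi_file_formats (file_names : List String) (out : Bool × Option String × List String) : Prop := out = check_multi_file_formats_alt file_names
instance (file_names : List String) (out : Bool × Option String × List String) : Decidable (Spec_check_multi_file_formats file_names out) := by unfold Spec_check_multi_file_formats; infer_instance

-- ===== CLAIM (what is proved, stated in full; the proofs are below) =====
def Claim_equal_check_multi_file_formats : Prop := ∀ (file_names : List String), Dom_check_multi_file_formats file_names → Spec_check_multi_file_formats file_names (check_multi_file_formats file_names)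

-- ===== LEMMAS AND PROOFS =====

-- filtering commutes with Set.add
theorem filter_set_add (p : String → Bool) (s : List String) (x : String) :
    List.filter p (PySem.Set.add s x) =
      if p x then PySem.Set.add (List.filter p s) x else List.filter p s := by
  by_cases hx : p x
  · by_cases hm : x ∈ s
    · have hf : x ∈ List.filter p s := List.mem_filter.mpr ⟨hm, hx⟩
      simp [PySem.Set.add, PySem.Set.contains, List.contains_eq_mem, hm, hx, hf]
    · have hf : x ∉ List.filter p s := fun h => hm (List.mem_filter.mp h).1
      simp [PySem.Set.add, PySem.Set.contains, List.contains_eq_mem, hm, hx, hf,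
        List.filter_append]
  · by_cases hm : x ∈ s
    · simp [PySem.Set.add, PySem.Set.contains, List.contains_eq_mem, hm, hx]
    · simp [PySem.Set.add, PySem.Set.contains, List.contains_eq_mem, hm, hx,
        List.filter_append]

-- filtering commutes with building a Set by repeated add
theorem filter_foldl_add (p : String → Bool) (l s : List String) :
    List.filter p (l.foldl PySem.Set.add s) = (l.filter p).foldl PySem.Set.add (List.filter p s) := by
  induction l generalizing s with
  | nil => rfl
  | cons x xs ih =>
    rw [List.foldl_cons, ih, filter_set_add, List.filter_cons]
    by_cases hx : p x
    · simp [hx]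
    · simp [hx]

-- A's loop, characterised over the mapped extension list
theorem loopA_char (l : List String) (b : Bool) (v i : PySem.Set String) :
    l.foldl stepA (b, v, i)
    = (b && (l.map _get_file_extension).all (fun e => MULTI_FILE_FORMATS.contains e),
       ((l.map _get_file_extension).filter (fun e => MULTI_FILE_FORMATS.contains e)).foldl PySem.Set.add v,
       ((l.map _get_file_extension).filter (fun e => ! MULTI_FILE_FORMATS.contains e)).foldl PySem.Set.add i) := by
  induction l generalizing b v i with
  | nil => simp
  | cons x xs ih =>
    by_cases h : MULTI_FILE_FORMATS.contains (_get_file_extension x)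
    · have h' : _get_file_extension x ∈ MULTI_FILE_FORMATS := by simpa using h
      have hstep : stepA (b, v, i) x = (b, PySem.Set.add v (_get_file_extension x), i) := by
        simp [stepA, h']
      rw [List.foldl_cons, hstep, ih]
      simp [h']
    · have h' : _get_file_extension x ∉ MULTI_FILE_FORMATS := by simpa using h
      have hstep : stepA (b, v, i) x = (false, v, PySem.Set.add i (_get_file_extension x)) := by
        simp [stepA, h']
      rw [List.foldl_cons, hstep, ih]
      simp [h']

-- B's peel loop, characterised: the remaining set loses the peeled formats,
-- the found list gains (in fs order) the formats present in r
theorem loopB_char (fs : List String) (hfs : fs.Nodup) (r acc : List String) :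
    fs.foldl stepB (r, acc)
    = (r.filter (fun e => ! fs.contains e), acc ++ fs.filter (fun f => r.contains f)) := by
  induction fs generalizing r acc with
  | nil => simp
  | cons f fs' ih =>
    have hf' : f ∉ fs' := (List.nodup_cons.mp hfs).1
    have hfs' : fs'.Nodup := (List.nodup_cons.mp hfs).2
    by_cases hm : f ∈ r
    · have hstep : stepB (r, acc) f = (PySem.Set.discard r f, acc ++ [f]) := by
        simp [stepB, PySem.Set.contains, List.contains_eq_mem, hm]
      rw [List.foldl_cons, hstep, ih hfs']
      refine Prod.ext ?_ ?_
      · -- remaining: filter over erase = filter over cons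
        show List.filter _ (List.filter _ r) = _
        rw [List.filter_filter]
        apply List.filter_congr
        intro e _
        simp only [List.contains_cons]
        cases h : (e == f) <;> simp
      · -- found: membership in the shrunk set agrees on fs' (discard removes only f)
        have hfe : List.filter (fun g => List.contains (List.filter (fun y => !y == f) r) g) fs'
            = List.filter (fun g => r.contains g) fs' := by
          apply List.filter_congr
          intro g hg
          have hgf : g ≠ f := fun h => hf' (h ▸ hg)
          simp [List.contains_eq_mem, List.mem_filter, hgf]
        show acc ++ [f] ++ List.filter (fun g => List.contains (List.filter (fun y => !y == f) r) g) fs' = _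
        rw [hfe, List.filter_cons]
        simp [List.contains_eq_mem, hm, List.append_assoc]
    · have hstep : stepB (r, acc) f = (r, acc) := by
        simp [stepB, PySem.Set.contains, List.contains_eq_mem, hm]
      rw [List.foldl_cons, hstep, ih hfs']
      refine Prod.ext ?_ ?_
      · apply List.filter_congr
        intro e he
        have hef : e ≠ f := fun h => hm (h ▸ he)
        simp only [List.contains_cons]
        simp [hef]
      · simp [List.contains_eq_mem, hm]

-- membership-based emptiness of Set.ofList
theorem ofList_eq_nil_iff (l : List String) : PySem.Set.ofList l = [] ↔ l = [] := by
  constructor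
  · intro h
    by_contra hne
    obtain ⟨y, hy⟩ := List.exists_mem_of_ne_nil l hne
    have := (PySem.Set.mem_ofList l y).mpr hy
    simp [h] at this
  · intro h; subst h; rfl

-- ===== VERDICT (by name: the statement is the Claim_ definition above) =====
theorem check_multi_file_formats_spec : Claim_equal_check_multi_file_formats := by
  intro file_names _
  show check_multi_file_formats file_names = check_multi_file_formats_alt file_names
  unfold check_multi_file_formats check_multi_file_formats_alt
  simp only [loopA_char, Bool.true_and]
  set exts := file_names.map _get_file_extension with hexts
  have hrem0 : file_names.foldl
      (fun (s : PySem.Set String) fn => PySem.Set.add s (_get_file_extension fn)) PySem.Set.empty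
      = PySem.Set.ofList exts := by
    rw [← PySem.Set.update_map_eq_foldl_add, ← hexts]
    exact PySem.Set.update_nil_left exts
  rw [hrem0, loopB_char MULTI_FILE_FORMATS (by decide), List.nil_append]
  dsimp only
  have hinv : List.filter (fun e => ! MULTI_FILE_FORMATS.contains e) (PySem.Set.ofList exts)
      = (exts.filter (fun e => ! MULTI_FILE_FORMATS.contains e)).foldl PySem.Set.add PySem.Set.empty := by
    rw [show PySem.Set.ofList exts = exts.foldl PySem.Set.add PySem.Set.empty from rfl,
      filter_foldl_add]
    rfl
  have hvalA : ((exts.filter (fun e => MULTI_FILE_FORMATS.contains e)).foldl PySem.Set.add PySem.Set.empty)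
      = PySem.Set.ofList (exts.filter (fun e => MULTI_FILE_FORMATS.contains e)) := rfl
  -- the valid lists on the two sides are permutations (both nodup, same members)
  have hperm : (PySem.Set.ofList (exts.filter (fun e => MULTI_FILE_FORMATS.contains e))).Perm
      (MULTI_FILE_FORMATS.filter (fun f => List.contains (PySem.Set.ofList exts) f)) := by
    rw [List.perm_ext_iff_of_nodup (PySem.Set.nodup_ofList _)
      (List.Nodup.filter _ (by decide))]
    intro a
    simp only [PySem.Set.mem_ofList, List.mem_filter, List.contains_iff_mem]
    tauto
  -- validity flag: all valid ↔ leftover set empty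
  have hbool : (exts.all (fun e => MULTI_FILE_FORMATS.contains e))
      = (List.filter (fun e => ! MULTI_FILE_FORMATS.contains e) (PySem.Set.ofList exts)).isEmpty := by
    rw [hinv]
    by_cases hall : exts.all (fun e => MULTI_FILE_FORMATS.contains e) = true
    · have hfe : exts.filter (fun e => ! MULTI_FILE_FORMATS.contains e) = [] := by
        rw [List.filter_eq_nil_iff]
        intro a ha
        have := List.all_eq_true.mp hall a ha
        simpa using this
      rw [hfe, hall]
      rfl
    · have hfne : exts.filter (fun e => ! MULTI_FILE_FORMATS.contains e) ≠ [] := by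
        intro hnil
        rw [List.filter_eq_nil_iff] at hnil
        apply hall
        rw [List.all_eq_true]
        intro a ha
        have := hnil a ha
        simpa using this
      have hne : (exts.filter (fun e => ! MULTI_FILE_FORMATS.contains e)).foldl PySem.Set.add PySem.Set.empty ≠ [] := by
        intro h
        exact hfne ((ofList_eq_nil_iff _).mp h)
      rw [Bool.eq_false_iff.mpr hall,
        show ((exts.filter (fun e => ! MULTI_FILE_FORMATS.contains e)).foldl PySem.Set.add PySem.Set.empty : List String).isEmpty = false from List.isEmpty_eq_false_iff.mpr hne]
  have hlenperm := hperm.length_eq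
  by_cases h1 : ((exts.filter (fun e => MULTI_FILE_FORMATS.contains e)).foldl PySem.Set.add PySem.Set.empty : List String).length = 1
  · have hA : PySem.Set.len ((exts.filter (fun e => MULTI_FILE_FORMATS.contains e)).foldl PySem.Set.add PySem.Set.empty) = 1 := by
      simp only [PySem.Set.len, h1]; rfl
    have hB : (MULTI_FILE_FORMATS.filter (fun f => List.contains (PySem.Set.ofList exts) f)).length = 1 := by
      rw [← hlenperm, ← hvalA]; exact h1
    rw [if_pos hA, if_pos hB]
    refine Prod.ext ?_ (Prod.ext ?_ ?_)
    · simpa using hbool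
    · -- both singletons; a permutation of a singleton is that singleton
      obtain ⟨a, ha⟩ := List.length_eq_one_iff.mp h1
      have hb := hperm
      rw [← hvalA] at hb
      rw [ha] at hb ⊢
      rw [List.perm_comm, List.perm_singleton] at hb
      rw [hb]
    · simpa using hinv.symm
  · have hA : ¬ PySem.Set.len ((exts.filter (fun e => MULTI_FILE_FORMATS.contains e)).foldl PySem.Set.add PySem.Set.empty) = 1 := by
      simp only [PySem.Set.len]
      exact_mod_cast h1
    have hB : ¬ (MULTI_FILE_FORMATS.filter (fun f => List.contains (PySem.Set.ofList exts) f)).length = 1 := by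
      rw [← hlenperm, ← hvalA]; exact h1
    rw [if_neg hA, if_neg hB]
    refine Prod.ext ?_ (Prod.ext ?_ ?_)
    · simpa using hbool
    · rfl
    · simpa using hinv.symm
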